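-- pv_equiv track=rewrite | github.com/boopa5/resume-parser | yoe/yoe.py | weighted_keyword
-- ===== SOURCE A (Python) =====
-- def weighted_keyword(keyword_pos, sample_pos) -> int:
--     res = []
--     for i in range(len(keyword_pos)):
--         res.append(0)
--         for j in range(len(sample_pos)):
--             dist = keyword_pos[i] - sample_pos[j]
--             res[i] += -dist * dist if dist < 0 else dist  # If keyword is beyond sample then punish
--     return keyword_pos[res.index(min(res))]
-- ===== SOURCE B (Python) =====
-- def weighted_keyword(keyword_pos, sample_pos) -> int:
--     # Sort samples once, precompute prefix sums of s and s*s, then score each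
--     # keyword in O(log S) via a binary-search split (samples <= k vs > k).
--     ss = sorted(sample_pos)
--     n = len(ss)
--     p1 = [0]
--     p2 = [0]
--     a = 0
--     b = 0
--     for s in ss:
--         a += s
--         b += s * s
--         p1.append(a)
--         p2.append(b)
--     best = None
--     for k in keyword_pos:
--         # m = number of samples <= k (stdlib bisect_right algorithm, hand-inlined)
--         lo, hi = 0, n
--         while lo < hi:
--             mid = (lo + hi) // 2
--             if ss[mid] <= k:
--                 lo = mid + 1
--             else:
--                 hi = mid
--         m = lo
--         # samples <= k each contribute k - s; samples > k contribute -(k-s)**2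
--         cost = m * k - p1[m] - ((n - m) * k * k - 2 * k * (p1[n] - p1[m]) + (p2[n] - p2[m]))
--         if best is None or cost < best[0]:
--             best = (cost, k)
--     return best[1]
-- ===== Notes on version B (the rewrite author's own statement) =====
-- stated objective: faster
-- what changed: Replaces the K×S nested distance loops plus a separate min/index pass with sort-once + prefix sums of s and s² and a per-keyword binary-search split, tracking the first minimum in a single running fold.
import Mathlib
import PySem

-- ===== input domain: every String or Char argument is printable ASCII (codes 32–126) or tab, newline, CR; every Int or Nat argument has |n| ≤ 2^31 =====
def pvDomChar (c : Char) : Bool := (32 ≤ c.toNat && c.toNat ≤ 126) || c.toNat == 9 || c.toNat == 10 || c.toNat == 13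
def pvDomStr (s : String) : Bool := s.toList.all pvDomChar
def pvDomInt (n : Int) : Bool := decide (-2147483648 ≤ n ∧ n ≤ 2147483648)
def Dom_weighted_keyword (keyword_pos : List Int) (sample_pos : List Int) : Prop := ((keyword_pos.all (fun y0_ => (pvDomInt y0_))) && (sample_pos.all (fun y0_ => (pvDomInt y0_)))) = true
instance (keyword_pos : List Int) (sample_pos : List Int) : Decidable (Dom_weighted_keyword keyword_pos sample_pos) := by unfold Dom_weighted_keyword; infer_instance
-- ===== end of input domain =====

-- B replaces A's K×S nested distance loops by sort-once + prefix sums + a binary-search split per keyword (objective: faster; measured).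

-- ===== PORT A =====
-- Loop indices i, j are always in range, so plain getD is exact for keyword_pos[i] / sample_pos[j];
-- res.index(min(res)) is always in range of keyword_pos, so the final indexing never raises.
def weighted_keyword (keyword_pos : List Int) (sample_pos : List Int) : Int :=
  let res := (List.range keyword_pos.length).foldl (fun res i =>
    let res := res ++ [(0 : Int)]
    (List.range sample_pos.length).foldl (fun res j =>
      let dist := keyword_pos.getD i 0 - sample_pos.getD j 0
      res.set i (res.getD i 0 + (if dist < 0 then -dist * dist else dist))) res) []
  match PySem.List.min? res (fun x => x) with
  | none => 0      -- min([]) raises ValueError in Python: excluded by Pre_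
  | some mn =>
    match PySem.List.index? res mn with
    | none => 0    -- unreachable: mn ∈ res
    | some idx => (PySem.List.pyGet? keyword_pos (idx : Int)).getD 0   -- idx < len(keyword_pos), in range

-- ===== PORT B =====
-- the prefix-sum loop of Source B: running sums a (of s) and b (of s*s), appended per element
def prefAux (a b : Int) : List Int → List Int × List Int
  | [] => ([], [])
  | s :: t =>
    let a' := a + s
    let b' := b + s * s
    let r := prefAux a' b' t
    (a' :: r.1, b' :: r.2)

-- Source B's hand-inlined stdlib bisect_right while-loop is ported as PySem.List.bisectRight, which is exactly that loop
def weighted_keyword_alt (keyword_pos : List Int) (sample_pos : List Int) : Int :=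
  let ss := PySem.List.sorted sample_pos (fun x => x) false
  let n := ss.length
  let pr := prefAux 0 0 ss
  let p1 := 0 :: pr.1
  let p2 := 0 :: pr.2
  let r := keyword_pos.foldl (fun acc k =>
    let m := PySem.List.bisectRight ss k
    let cost : Int := (m : Int) * k - p1.getD m 0
      - (((n : Int) - (m : Int)) * k * k - 2 * k * (p1.getD n 0 - p1.getD m 0)
          + (p2.getD n 0 - p2.getD m 0))
    match acc with
    | none => some (cost, k)
    | some (bv, bk) => if cost < bv then some (cost, k) else some (bv, bk)) none
  match r with
  | none => 0      -- best is None only for empty keyword_pos (Source B raises TypeError there): excluded by Pre_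
  | some (_, bk) => bk

-- ===== PRECONDITION & SPEC =====
-- Pre_ excludes only keyword_pos = [], on which A raises ValueError (min() of an empty list).
def Pre_weighted_keyword (keyword_pos : List Int) (sample_pos : List Int) : Prop :=
  keyword_pos ≠ []
instance (keyword_pos : List Int) (sample_pos : List Int) : Decidable (Pre_weighted_keyword keyword_pos sample_pos) := by unfold Pre_weighted_keyword; infer_instance
def pvWitness_weighted_keyword : List Int × List Int := ([3, -1, 7], [2, 5])

def Spec_weighted_keyword (keyword_pos : List Int) (sample_pos : List Int) (out : Int) : Prop := out = weighted_keyword_alt keyword_pos sample_pos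
instance (keyword_pos : List Int) (sample_pos : List Int) (out : Int) : Decidable (Spec_weighted_keyword keyword_pos sample_pos out) := by unfold Spec_weighted_keyword; infer_instance

-- ===== CLAIM (what is proved, stated in full; the proofs are below) =====
def Claim_equal_weighted_keyword : Prop := ∀ (keyword_pos : List Int) (sample_pos : List Int), Dom_weighted_keyword keyword_pos sample_pos → Pre_weighted_keyword keyword_pos sample_pos → Spec_weighted_keyword keyword_pos sample_pos (weighted_keyword keyword_pos sample_pos)

-- ===== LEMMAS AND PROOFS =====

theorem pv_inner (g : Nat → Int) : ∀ (m : Nat) (i : Nat) (res : List Int), i < res.length →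
    (List.range m).foldl (fun r j => r.set i (r.getD i 0 + g j)) res
    = res.set i (res.getD i 0 + ((List.range m).map g).sum) := by
  intro m
  induction m with
  | zero =>
    intro i res h
    simp [List.getD, List.getElem?_eq_getElem h]
  | succ m ih =>
    intro i res h
    rw [List.range_succ, List.foldl_append, List.foldl_cons, List.foldl_nil, ih _ _ h,
      List.map_append, List.sum_append]
    simp [List.getD, List.getElem?_set_self h, List.set_set]
    ring_nf

def pvF (k s : Int) : Int := if k - s < 0 then -(k - s) * (k - s) else k - s
def pvCost (sp : List Int) (k : Int) : Int := (sp.map (pvF k)).sum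

theorem pv_getD_range (l : List Int) : (List.range l.length).map (fun j => l.getD j 0) = l := by
  apply List.ext_getElem
  · simp
  · intro i h1 h2
    simp [List.getD, List.getElem?_eq_getElem h2]

theorem pv_set_append (l : List Int) (x v : Int) : (l ++ [x]).set l.length v = l ++ [v] := by
  induction l with
  | nil => rfl
  | cons y t ih => simp [ih]

theorem pv_set_append' (l : List Int) (i : Nat) (x v : Int) (h : i = l.length) :
    (l ++ [x]).set i v = l ++ [v] := by
  subst h; exact pv_set_append l x v

theorem pv_outer (kp sp : List Int) : ∀ i, i ≤ kp.length →
    (List.range i).foldl (fun res i' =>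
      (List.range sp.length).foldl (fun r j =>
        r.set i' (r.getD i' 0 +
          (if kp.getD i' 0 - sp.getD j 0 < 0
           then -(kp.getD i' 0 - sp.getD j 0) * (kp.getD i' 0 - sp.getD j 0)
           else kp.getD i' 0 - sp.getD j 0))) (res ++ [0])) []
    = (kp.take i).map (pvCost sp) := by
  intro i
  induction i with
  | zero => simp
  | succ i ih =>
    intro h
    have hi : i < kp.length := by omega
    rw [List.range_succ, List.foldl_append, List.foldl_cons, List.foldl_nil, ih (by omega)]
    have hlen : ((kp.take i).map (pvCost sp)).length = i := by
      rw [List.length_map, List.length_take]; omega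
    have hidx : i < ((kp.take i).map (pvCost sp) ++ [(0:Int)]).length := by
      simp; omega
    have hin := pv_inner (fun j => pvF (kp.getD i 0) (sp.getD j 0)) sp.length i
      ((kp.take i).map (pvCost sp) ++ [(0:Int)]) hidx
    simp only [pvF] at hin
    rw [hin]
    have hg : ((kp.take i).map (pvCost sp) ++ [(0:Int)]).getD i 0 = 0 := by
      rw [← hlen]; simp [List.getD]
    rw [hg]
    have hS : ((List.range sp.length).map
        (fun j => if kp.getD i 0 - sp.getD j 0 < 0
          then -(kp.getD i 0 - sp.getD j 0) * (kp.getD i 0 - sp.getD j 0)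
          else kp.getD i 0 - sp.getD j 0)).sum = pvCost sp (kp.getD i 0) := by
      have h1 : (List.range sp.length).map
          (fun j => if kp.getD i 0 - sp.getD j 0 < 0
            then -(kp.getD i 0 - sp.getD j 0) * (kp.getD i 0 - sp.getD j 0)
            else kp.getD i 0 - sp.getD j 0)
          = ((List.range sp.length).map (fun j => sp.getD j 0)).map (pvF (kp.getD i 0)) := by
        rw [List.map_map]; rfl
      rw [h1, pv_getD_range]; rfl
    have hset : ((kp.take i).map (pvCost sp) ++ [(0:Int)]).set i
          (0 + pvCost sp (kp.getD i 0))
        = (kp.take i).map (pvCost sp) ++ [0 + pvCost sp (kp.getD i 0)] := by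
      exact pv_set_append' _ _ _ _ hlen.symm
    rw [hS, hset, zero_add]
    rw [List.take_add_one]
    have hopt : kp[i]?.toList = [kp[i]] := by simp [List.getElem?_eq_getElem hi]
    rw [hopt, List.map_append]
    simp [List.getD, List.getElem?_eq_getElem hi]

def pvStep (c : Int → Int) (acc : Option (Int × Int)) (k : Int) : Option (Int × Int) :=
  match acc with
  | none => some (c k, k)
  | some (bv, bk) => if c k < bv then some (c k, k) else some (bv, bk)

def pvFmp (c : Int → Int) : List Int → Option (Int × Int)
  | [] => none
  | k :: t =>
    match pvFmp c t with
    | none => some (c k, k)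
    | some (v, b) => if c k ≤ v then some (c k, k) else some (v, b)

theorem pv_foldl_some (c : Int → Int) : ∀ (t : List Int) (v b : Int),
    t.foldl (pvStep c) (some (v, b)) =
    some (match pvFmp c t with | none => (v, b) | some (v', b') => if v' < v then (v', b') else (v, b)) := by
  intro t
  induction t with
  | nil => intro v b; rfl
  | cons k t ih =>
    intro v b
    rw [List.foldl_cons]
    show List.foldl (pvStep c) (pvStep c (some (v,b)) k) t = _
    simp only [pvStep]
    split_ifs with h1
    · rw [ih]
      simp only [pvFmp]
      cases hf : pvFmp c t with
      | none => simp; intro h2; exfalso; omega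
      | some p =>
        obtain ⟨v', b'⟩ := p
        simp [hf]; split_ifs <;> simp_all <;> omega
    · rw [ih]
      simp only [pvFmp]
      cases hf : pvFmp c t with
      | none => simp; intro h2; exfalso; omega
      | some p =>
        obtain ⟨v', b'⟩ := p
        simp [hf]; split_ifs <;> simp_all <;> omega

theorem pv_foldl_none (c : Int → Int) : ∀ (kp : List Int),
    kp.foldl (pvStep c) none = pvFmp c kp := by
  intro kp
  cases kp with
  | nil => rfl
  | cons k t =>
    rw [List.foldl_cons]
    show List.foldl (pvStep c) (some (c k, k)) t = _
    rw [pv_foldl_some]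
    simp only [pvFmp]
    cases hf : pvFmp c t with
    | none => simp
    | some p =>
      obtain ⟨v', b'⟩ := p
      simp only []
      split_ifs <;> simp_all <;> omega

theorem pv_fmp_none (c : Int → Int) : ∀ t, pvFmp c t = none ↔ t = [] := by
  intro t
  cases t with
  | nil => simp [pvFmp]
  | cons a s =>
    simp only [pvFmp]
    cases h : pvFmp c s with
    | none => simp
    | some p => obtain ⟨x, y⟩ := p; simp only []; split_ifs <;> simp

theorem pv_fmp_spec (c : Int → Int) : ∀ (kp : List Int) (v b : Int), pvFmp c kp = some (v, b) →
    (∀ y ∈ kp.map c, v ≤ y) ∧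
    ∃ i, PySem.List.index? (kp.map c) v = some i ∧ kp.getD i 0 = b := by
  intro kp
  induction kp with
  | nil => intro v b h; simp [pvFmp] at h
  | cons k t ih =>
    intro v b h
    simp only [pvFmp] at h
    cases hf : pvFmp c t with
    | none =>
      rw [hf] at h
      simp at h
      obtain ⟨hv, hb⟩ := h
      have ht : t = [] := (pv_fmp_none c t).mp hf
      subst ht; subst hv; subst hb
      refine ⟨by simp, 0, ?_, rfl⟩
      exact PySem.List.index?_cons_self _ _
    | some p =>
      obtain ⟨v', b'⟩ := p
      rw [hf] at h
      simp only [] at h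
      obtain ⟨hall, i, hidx, hget⟩ := ih v' b' hf
      split_ifs at h with hle
      · simp at h
        obtain ⟨hv, hb⟩ := h
        subst hv; subst hb
        refine ⟨?_, 0, ?_, rfl⟩
        · intro y hy
          simp at hy
          rcases hy with hy | ⟨s, hs, rfl⟩
          · omega
          · have := hall (c s) (by simp; exact ⟨s, hs, rfl⟩); omega
        · exact PySem.List.index?_cons_self _ _
      · simp at h
        obtain ⟨hv, hb⟩ := h
        subst hv; subst hb
        have hne : c k ≠ v' := by omega
        refine ⟨?_, ?_⟩
        · intro y hy
          simp at hy
          rcases hy with hy | ⟨s, hs, rfl⟩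
          · omega
          · exact hall (c s) (by simp; exact ⟨s, hs, rfl⟩)
        · refine ⟨i + 1, ?_, ?_⟩
          · rw [List.map_cons, PySem.List.index?_cons_of_ne _ hne, hidx]; rfl
          · simpa using hget

theorem pv_pref_fst : ∀ (l : List Int) (a b : Int) (j : Nat), j < l.length →
    (prefAux a b l).1.getD j 0 = a + (l.take (j+1)).sum := by
  intro l
  induction l with
  | nil => intro a b j h; simp at h
  | cons s t ih =>
    intro a b j h
    cases j with
    | zero => simp [prefAux]
    | succ j =>
      simp only [prefAux, List.getD_cons_succ, List.take_succ_cons, List.sum_cons]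
      rw [ih (a + s) (b + s*s) j (by simpa using h)]
      ring

theorem pv_pref_snd : ∀ (l : List Int) (a b : Int) (j : Nat), j < l.length →
    (prefAux a b l).2.getD j 0 = b + ((l.take (j+1)).map (fun s => s * s)).sum := by
  intro l
  induction l with
  | nil => intro a b j h; simp at h
  | cons s t ih =>
    intro a b j h
    cases j with
    | zero => simp [prefAux]
    | succ j =>
      simp only [prefAux, List.getD_cons_succ, List.take_succ_cons, List.map_cons, List.sum_cons]
      rw [ih (a + s) (b + s*s) j (by simpa using h)]
      ring

theorem pv_p1 (l : List Int) (m : Nat) (h : m ≤ l.length) :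
    (0 :: (prefAux 0 0 l).1).getD m 0 = (l.take m).sum := by
  cases m with
  | zero => simp
  | succ m => rw [List.getD_cons_succ, pv_pref_fst l 0 0 m (by omega)]; ring

theorem pv_p2 (l : List Int) (m : Nat) (h : m ≤ l.length) :
    (0 :: (prefAux 0 0 l).2).getD m 0 = ((l.take m).map (fun s => s * s)).sum := by
  cases m with
  | zero => simp
  | succ m => rw [List.getD_cons_succ, pv_pref_snd l 0 0 m (by omega)]; ring

theorem pv_sum_le (k : Int) : ∀ (l : List Int), (∀ s ∈ l, s ≤ k) →
    (l.map (pvF k)).sum = (l.length : Int) * k - l.sum := by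
  intro l
  induction l with
  | nil => simp
  | cons s t ih =>
    intro h
    have hs : s ≤ k := h s (by simp)
    have := ih (fun x hx => h x (by simp [hx]))
    simp only [List.map_cons, List.sum_cons, List.length_cons, this, pvF]
    split_ifs with h1
    · omega
    · push_cast; ring

theorem pv_sum_gt (k : Int) : ∀ (l : List Int), (∀ s ∈ l, k < s) →
    (l.map (pvF k)).sum
      = -((l.length : Int) * k * k - 2 * k * l.sum + ((l.map (fun s => s * s)).sum)) := by
  intro l
  induction l with
  | nil => simp
  | cons s t ih =>
    intro h
    have hs : k < s := h s (by simp)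
    have := ih (fun x hx => h x (by simp [hx]))
    simp only [List.map_cons, List.sum_cons, List.length_cons, this, pvF]
    split_ifs with h1
    · push_cast; ring
    · omega

theorem pv_cost_eq (ss sp : List Int) (k : Int)
    (hperm : ss.Perm sp) (hpair : ss.Pairwise (· ≤ ·)) :
    ((PySem.List.bisectRight ss k : Nat) : Int) * k
      - (0 :: (prefAux 0 0 ss).1).getD (PySem.List.bisectRight ss k) 0
      - (((ss.length : Int) - ((PySem.List.bisectRight ss k : Nat) : Int)) * k * k
         - 2 * k * ((0 :: (prefAux 0 0 ss).1).getD ss.length 0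
                    - (0 :: (prefAux 0 0 ss).1).getD (PySem.List.bisectRight ss k) 0)
         + ((0 :: (prefAux 0 0 ss).2).getD ss.length 0
            - (0 :: (prefAux 0 0 ss).2).getD (PySem.List.bisectRight ss k) 0))
    = pvCost sp k := by
  obtain ⟨hmn, hpre, hsuf⟩ := PySem.List.bisectRight_spec ss k hpair
  set m := PySem.List.bisectRight ss k with hm
  have htake : ∀ s ∈ ss.take m, s ≤ k := by
    intro s hs
    rw [List.mem_iff_getElem] at hs
    obtain ⟨j, hj, rfl⟩ := hs
    have hj2 : j < ss.length := by
      have := hj; rw [List.length_take] at this; omega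
    rw [List.getElem_take]
    apply hpre j hj2
    have := hj; rw [List.length_take] at this; omega
  have hdrop : ∀ s ∈ ss.drop m, k < s := by
    intro s hs
    rw [List.mem_iff_getElem] at hs
    obtain ⟨j, hj, rfl⟩ := hs
    have hj2 : m + j < ss.length := by
      have := hj; rw [List.length_drop] at this; omega
    rw [List.getElem_drop]
    exact hsuf (m + j) hj2 (by omega)
  have hsplit : ss.take m ++ ss.drop m = ss := List.take_append_drop m ss
  have hsum : (ss.take m).sum + (ss.drop m).sum = ss.sum := by
    rw [← List.sum_append, hsplit]
  have hsq : ((ss.take m).map (fun s => s * s)).sum + ((ss.drop m).map (fun s => s * s)).sum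
      = (ss.map (fun s => s * s)).sum := by
    rw [← List.sum_append, ← List.map_append, hsplit]
  have hmap : (ss.map (pvF k)).sum
      = ((ss.take m).map (pvF k)).sum + ((ss.drop m).map (pvF k)).sum := by
    rw [← List.sum_append, ← List.map_append, hsplit]
  have hlt : ((ss.take m).length : Int) = (m : Int) := by
    rw [List.length_take]; congr 1; omega
  have hld : ((ss.drop m).length : Int) = (ss.length : Int) - (m : Int) := by
    rw [List.length_drop]; push_cast [Nat.cast_sub hmn]; ring
  have hc : pvCost sp k = (ss.map (pvF k)).sum := ((hperm.map (pvF k)).sum_eq).symm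
  rw [hc, hmap, pv_sum_le k _ htake, pv_sum_gt k _ hdrop, hlt, hld,
    pv_p1 ss m hmn, pv_p1 ss ss.length le_rfl, pv_p2 ss m hmn, pv_p2 ss ss.length le_rfl,
    List.take_length, ← hsum, ← hsq]
  ring

theorem pv_alt_eq (kp sp : List Int) :
    weighted_keyword_alt kp sp =
      (match pvFmp (pvCost sp) kp with
       | none => 0
       | some (_, bk) => bk) := by
  simp only [weighted_keyword_alt]
  rw [← pv_foldl_none]
  have hcost : ∀ k : Int,
      ((PySem.List.bisectRight (PySem.List.sorted sp (fun x => x) false) k : Nat) : Int) * k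
      - (0 :: (prefAux 0 0 (PySem.List.sorted sp (fun x => x) false)).1).getD (PySem.List.bisectRight (PySem.List.sorted sp (fun x => x) false) k) 0
      - ((((PySem.List.sorted sp (fun x => x) false).length : Int) - ((PySem.List.bisectRight (PySem.List.sorted sp (fun x => x) false) k : Nat) : Int)) * k * k
         - 2 * k * ((0 :: (prefAux 0 0 (PySem.List.sorted sp (fun x => x) false)).1).getD (PySem.List.sorted sp (fun x => x) false).length 0
                    - (0 :: (prefAux 0 0 (PySem.List.sorted sp (fun x => x) false)).1).getD (PySem.List.bisectRight (PySem.List.sorted sp (fun x => x) false) k) 0)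
         + ((0 :: (prefAux 0 0 (PySem.List.sorted sp (fun x => x) false)).2).getD (PySem.List.sorted sp (fun x => x) false).length 0
            - (0 :: (prefAux 0 0 (PySem.List.sorted sp (fun x => x) false)).2).getD (PySem.List.bisectRight (PySem.List.sorted sp (fun x => x) false) k) 0))
      = pvCost sp k := fun k =>
    pv_cost_eq _ sp k (PySem.List.sorted_perm sp _ false) (PySem.List.sorted_pairwise sp _)
  congr 1
  apply List.foldl_ext
  intro acc k hk
  cases acc with
  | none =>
    show some (_, k) = pvStep (pvCost sp) none k
    rw [hcost k]
    rfl
  | some p =>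
    obtain ⟨bv, bk⟩ := p
    show (if _ < bv then _ else _) = pvStep (pvCost sp) (some (bv, bk)) k
    rw [hcost k]
    rfl

theorem pv_main (kp sp : List Int) (h : kp ≠ []) :
    weighted_keyword kp sp = weighted_keyword_alt kp sp := by
  rw [pv_alt_eq]
  simp only [weighted_keyword]
  have hres := pv_outer kp sp kp.length le_rfl
  rw [List.take_length] at hres
  rw [hres]
  cases hf : pvFmp (pvCost sp) kp with
  | none => exact absurd ((pv_fmp_none _ kp).mp hf) h
  | some p =>
    obtain ⟨v, b⟩ := p
    obtain ⟨hall, i, hidx, hget⟩ := pv_fmp_spec (pvCost sp) kp v b hf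
    have hvmem : v ∈ kp.map (pvCost sp) := by
      rw [← PySem.List.index?_isSome_iff (xs := kp.map (pvCost sp)) (v := v), hidx]; rfl
    have hne : kp.map (pvCost sp) ≠ [] := by simp [h]
    cases hmin : PySem.List.min? (kp.map (pvCost sp)) (fun x => x) with
    | none => exact absurd (Iff.mp (PySem.List.min?_eq_none_iff _ _) hmin) hne
    | some mres =>
      have hmm : mres ∈ kp.map (pvCost sp) := PySem.List.min?_mem hmin
      have h1 : mres ≤ v := PySem.List.min?_isMin hmin v hvmem
      have h2 : v ≤ mres := hall mres hmm
      have hveq : mres = v := le_antisymm h1 h2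
      subst hveq
      dsimp only
      rw [hidx]
      dsimp only
      obtain ⟨hk, -, -⟩ := PySem.List.getElem_of_index?_eq_some hidx
      have hik : i < kp.length := by simpa using hk
      rw [PySem.List.pyGet?_natCast]
      rw [← hget]
      simp [List.getD, List.getElem?_eq_getElem hik]

-- ===== VERDICT (by name: the statement is the Claim_ definition above) =====
theorem weighted_keyword_spec : Claim_equal_weighted_keyword := by
  intro keyword_pos sample_pos _ hpre
  exact pv_main keyword_pos sample_pos hpre
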